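-- pv_equiv track=rewrite | github.com/zzhzhouzihan016/eit-image-enhancement | src/eit/dataset_structeit.py | limit_case_ids_per_source
-- ===== SOURCE A (Python) =====
-- from typing import Any, Callable, Sequence
--
-- def infer_structeit_source_group(case_id: str) -> str:
--     if case_id.startswith("LIDC-IDRI-"):
--         return "LIDC-IDRI"
--     if case_id.startswith("LUNG1-"):
--         return "LUNG1"
--     return case_id.split("-", 1)[0]
--
-- def limit_case_ids_per_source(case_ids: Sequence[str], per_source_limit: int | None) -> list[str]:
--     if per_source_limit is None or per_source_limit <= 0:
--         return list(case_ids)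
--
--     remaining: dict[str, int] = {}
--     limited: list[str] = []
--     for case_id in case_ids:
--         source_group = infer_structeit_source_group(case_id)
--         count = remaining.get(source_group, 0)
--         if count >= per_source_limit:
--             continue
--         remaining[source_group] = count + 1
--         limited.append(case_id)
--     return limited
-- ===== SOURCE B (Python) =====
-- def infer_structeit_source_group(case_id: str) -> str:
--     if case_id.startswith("LIDC-IDRI-"):
--         return "LIDC-IDRI"
--     if case_id.startswith("LUNG1-"):
--         return "LUNG1"
--     return case_id.split("-", 1)[0]
--
--
-- def limit_case_ids_per_source(case_ids, per_source_limit):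
--     if per_source_limit is None or per_source_limit <= 0:
--         return list(case_ids)
--     buckets = {}
--     for i, case_id in enumerate(case_ids):
--         buckets.setdefault(infer_structeit_source_group(case_id), []).append(i)
--     keep = sorted(i for idxs in buckets.values() for i in idxs[:per_source_limit])
--     return [case_ids[i] for i in keep]
-- ===== Notes on version B (the rewrite author's own statement) =====
-- stated objective: alternative
-- what changed: Replaces A's single streaming pass with a count-and-skip accumulator by a group-and-slice strategy: build a dict mapping each source group to the list of positions of its ids, keep only the first per_source_limit positions of each group, sort the surviving positions to restore the original order, and index back into case_ids.
import Mathlib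
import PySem

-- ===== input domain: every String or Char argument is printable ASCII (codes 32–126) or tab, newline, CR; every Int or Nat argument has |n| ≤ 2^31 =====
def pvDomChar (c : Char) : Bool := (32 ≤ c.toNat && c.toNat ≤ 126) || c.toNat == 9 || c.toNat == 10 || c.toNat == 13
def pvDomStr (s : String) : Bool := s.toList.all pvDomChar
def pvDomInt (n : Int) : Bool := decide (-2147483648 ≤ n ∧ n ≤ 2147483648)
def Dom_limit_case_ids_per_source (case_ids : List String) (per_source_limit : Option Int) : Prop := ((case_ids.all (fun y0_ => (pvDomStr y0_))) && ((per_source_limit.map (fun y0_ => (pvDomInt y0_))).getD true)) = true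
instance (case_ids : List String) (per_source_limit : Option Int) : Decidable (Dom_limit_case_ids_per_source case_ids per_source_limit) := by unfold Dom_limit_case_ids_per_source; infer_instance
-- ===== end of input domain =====

-- B replaces A's streaming count-and-skip pass by group-and-slice: bucket the positions by
-- source group, keep the first `limit` positions of each bucket, sort the kept positions, index back.

-- ===== PORT A =====
-- shared helper infer_structeit_source_group (used by both Pythons verbatim)
def inferGroup (case_id : String) : String :=
  if PySem.Str.startswith case_id "LIDC-IDRI-" then "LIDC-IDRI"
  else if PySem.Str.startswith case_id "LUNG1-" then "LUNG1"
  else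
    -- case_id.split("-", 1)[0]: sep ≠ "" so splitMax? is some and nonempty, the [0] never raises
    match PySem.Str.splitMax? case_id "-" 1 with
    | some (p :: _) => p
    | _ => ""

def limit_case_ids_per_source (case_ids : List String) (per_source_limit : Option Int) : List String :=
  match per_source_limit with
  | none => case_ids
  | some L =>
    if L ≤ 0 then case_ids
    else
      (case_ids.foldl
        (fun (st : PySem.Dict String Int × List String) case_id =>
          let source_group := inferGroup case_id
          let count := st.1.getD source_group 0
          if count ≥ L then st
          else (st.1.insert source_group (count + 1), st.2 ++ [case_id]))
        (PySem.Dict.empty, [])).2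

-- ===== PORT B =====
def limit_case_ids_per_source_alt (case_ids : List String) (per_source_limit : Option Int) : List String :=
  match per_source_limit with
  | none => case_ids
  | some L =>
    if L ≤ 0 then case_ids
    else
      -- buckets.setdefault(g, []).append(i) ported as modify g [] (· ++ [i])
      let buckets : PySem.Dict String (List Int) :=
        (PySem.List.enumerate case_ids 0).foldl
          (fun d p => d.modify (inferGroup p.2) [] (· ++ [p.1])) PySem.Dict.empty
      let keep := PySem.List.sorted
        (buckets.values.flatMap (fun idxs => PySem.List.slice idxs none (some L)))
        (fun x => x) false
      -- case_ids[i]: every kept i is an in-range index, so the default "" is never used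
      keep.map (fun i => PySem.List.pyGetD case_ids i "")

-- ===== PRECONDITION & SPEC =====
def Spec_limit_case_ids_per_source (case_ids : List String) (per_source_limit : Option Int) (out : List String) : Prop := out = limit_case_ids_per_source_alt case_ids per_source_limit
instance (case_ids : List String) (per_source_limit : Option Int) (out : List String) : Decidable (Spec_limit_case_ids_per_source case_ids per_source_limit out) := by unfold Spec_limit_case_ids_per_source; infer_instance

-- ===== CLAIM (what is proved, stated in full; the proofs are below) =====
def Claim_equal_limit_case_ids_per_source : Prop := ∀ (case_ids : List String) (per_source_limit : Option Int), Dom_limit_case_ids_per_source case_ids per_source_limit → Spec_limit_case_ids_per_source case_ids per_source_limit (limit_case_ids_per_source case_ids per_source_limit)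

-- ===== LEMMAS AND PROOFS =====

-- The common yardstick: keep pair p = (i, c) of the enumeration iff the group of c occurs
-- fewer than L times among the groups G of the ids before position i.
def keepP (L : Int) (G : List String) (p : Int × String) : Bool :=
  decide ((((PySem.List.slice G none (some p.1)).count (PySem.List.pyGetD G p.1 "") : Int)) < L)

-- intermediate streaming characterisation shared by the two directions
def keepFrom (L : Int) (pre : List String) : List String → List String
  | [] => []
  | c :: cs =>
    let g := inferGroup c
    if (pre.count g : Int) < L then c :: keepFrom L (pre ++ [g]) cs
    else keepFrom L (pre ++ [g]) cs

-- A side: the dict stores min L (count of the group so far); the emitted list is keepFrom.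
lemma aSide (L : Int) :
    ∀ (cs : List String) (d : PySem.Dict String Int) (pre : List String) (acc : List String),
    (∀ g, d.getD g 0 = min L ((pre.count g : Int))) →
    (cs.foldl
      (fun (st : PySem.Dict String Int × List String) case_id =>
        let source_group := inferGroup case_id
        let count := st.1.getD source_group 0
        if count ≥ L then st
        else (st.1.insert source_group (count + 1), st.2 ++ [case_id]))
      (d, acc)).2 = acc ++ keepFrom L pre cs := by
  intro cs
  induction cs with
  | nil => intro d pre acc h; simp [keepFrom]
  | cons c cs ih =>
    intro d pre acc h
    simp only [List.foldl_cons, keepFrom]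
    by_cases hc : d.getD (inferGroup c) 0 ≥ L
    · have hcnt : ¬ ((pre.count (inferGroup c) : Int) < L) := by
        have := h (inferGroup c); omega
      simp only [hc, if_true, hcnt, if_false]
      exact ih d (pre ++ [inferGroup c]) acc (by
        intro g
        rw [h g]
        by_cases hg : g = inferGroup c
        · rw [hg]
          have := h (inferGroup c)
          simp only [List.count_append, List.count_singleton, beq_self_eq_true, if_true,
            Nat.cast_add, Nat.cast_one]
          omega
        · simp [List.count_append, Ne.symm hg])
    · have hcnt : (pre.count (inferGroup c) : Int) < L := by
        have := h (inferGroup c); omega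
      simp only [hc, if_false, hcnt, if_true]
      rw [ih _ (pre ++ [inferGroup c]) (acc ++ [c]) (by
        intro g
        by_cases hg : g = inferGroup c
        · rw [hg, PySem.Dict.getD_insert, if_pos rfl]
          have := h (inferGroup c)
          simp only [List.count_append, List.count_singleton, beq_self_eq_true, if_true,
            Nat.cast_add, Nat.cast_one]
          omega
        · rw [PySem.Dict.getD_insert, if_neg hg, h g]
          simp [List.count_append, Ne.symm hg])]
      simp

-- keepFrom is the keepP-filter of the enumeration
lemma keepFilter (L : Int) (G : List String) :
    ∀ (cs : List String) (pre : List String),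
    G = pre ++ cs.map inferGroup →
    ((PySem.List.enumerate cs (pre.length : Int)).filter (keepP L G)).map (·.2)
    = keepFrom L pre cs := by
  intro cs
  induction cs with
  | nil => intro pre h; simp [PySem.List.enumerate, keepFrom]
  | cons c cs ih =>
    intro pre h
    rw [PySem.List.enumerate_cons]
    have hslice : PySem.List.slice G none (some (pre.length : Int)) = pre := by
      rw [PySem.List.slice_to_natCast, h, List.take_append]
      simp
    have hget : PySem.List.pyGetD G (pre.length : Int) "" = inferGroup c := by
      rw [PySem.List.pyGetD_natCast, h]
      simp [List.getD]
    have hrec := ih (pre ++ [inferGroup c]) (by simp [h])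
    simp only [List.length_append, List.length_singleton] at hrec
    push_cast at hrec
    simp only [List.filter_cons, keepP, hslice, hget, keepFrom]
    by_cases hc : (pre.count (inferGroup c) : Int) < L
    · simp only [hc, decide_true, if_true, List.map_cons]
      exact congrArg (c :: ·) hrec
    · simp only [hc, decide_false, if_false, Bool.false_eq_true]
      exact hrec

-- B side, step 1: the first-L slice of group g's bucket is the keepP-filter restricted to g.
lemma bucketTake (L : Int) (G : List String) (g : String) :
    ∀ (cs : List String) (pre : List String),
    G = pre ++ cs.map inferGroup →
    ((PySem.List.enumerate cs (pre.length : Int)).filter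
        (fun p => inferGroup p.2 == g && keepP L G p)).map (·.1)
    = (((PySem.List.enumerate cs (pre.length : Int)).filter
        (fun p => inferGroup p.2 == g)).map (·.1)).take (L.toNat - pre.count g) := by
  intro cs
  induction cs with
  | nil => intro pre h; simp [PySem.List.enumerate]
  | cons c cs ih =>
    intro pre h
    rw [PySem.List.enumerate_cons]
    have hslice : PySem.List.slice G none (some (pre.length : Int)) = pre := by
      rw [PySem.List.slice_to_natCast, h, List.take_append]
      simp
    have hget : PySem.List.pyGetD G (pre.length : Int) "" = inferGroup c := by
      rw [PySem.List.pyGetD_natCast, h]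
      simp [List.getD]
    have hrec := ih (pre ++ [inferGroup c]) (by simp [h])
    simp only [List.length_append, List.length_singleton] at hrec
    push_cast at hrec
    simp only [keepP] at hrec
    simp only [List.filter_cons, keepP, hslice, hget]
    by_cases hgc : inferGroup c = g
    · subst hgc
      simp only [beq_self_eq_true, Bool.true_and]
      by_cases hc : (pre.count (inferGroup c) : Int) < L
      · have hlt : pre.count (inferGroup c) < L.toNat := by omega
        simp only [hc, decide_true, if_true, List.map_cons]
        have hn : L.toNat - pre.count (inferGroup c)
            = (L.toNat - (pre.count (inferGroup c) + 1)) + 1 := by omega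
        rw [hn, List.take_succ_cons, hrec]
        simp [List.count_append]
      · have h0 : L.toNat - pre.count (inferGroup c) = 0 := by omega
        have h0' : L.toNat - (pre ++ [inferGroup c]).count (inferGroup c) = 0 := by
          simp only [List.count_append, List.count_singleton, beq_self_eq_true, if_true]
          omega
        simp only [hc, decide_false, Bool.false_eq_true, if_false, h0, List.take_zero]
        rw [hrec, h0', List.take_zero]
    · have hbeq : (inferGroup c == g) = false := by
        simp [hgc]
      simp only [hbeq, Bool.false_and, Bool.false_eq_true, if_false]
      rw [hrec]
      simp [List.count_append, hgc]

-- B side, step 2: flatMap of disjoint filters over a covering Nodup key list is a permutation.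
lemma permFlatMapFilter {α κ : Type} [BEq κ] [LawfulBEq κ] (key : α → κ) :
    ∀ (gs : List κ) (l : List α), gs.Nodup → (∀ x ∈ l, key x ∈ gs) →
    (gs.flatMap (fun g => l.filter (fun x => key x == g))).Perm l := by
  intro gs
  induction gs with
  | nil =>
    intro l _ hcov
    have : l = [] := by
      cases l with
      | nil => rfl
      | cons x xs => exact absurd (hcov x (by simp)) (by simp)
    simp [this]
  | cons g gs ih =>
    intro l hnd hcov
    rw [List.flatMap_cons]
    have hnd' := hnd
    rw [List.nodup_cons] at hnd'
    have hcongr : ∀ g' ∈ gs,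
        l.filter (fun x => key x == g')
        = (l.filter (fun x => !(key x == g))).filter (fun x => key x == g') := by
      intro g' hg'
      rw [List.filter_filter]
      apply List.filter_congr
      intro x _
      by_cases hx : key x = g'
      · have hne : g' ≠ g := fun hh => hnd'.1 (hh ▸ hg')
        simp [hx, hne]
      · simp [hx]
    have hmap : gs.flatMap (fun g' => l.filter (fun x => key x == g'))
        = gs.flatMap (fun g' => (l.filter (fun x => !(key x == g))).filter
            (fun x => key x == g')) := by
      apply List.flatMap_congr
      intro g' hg'
      exact hcongr g' hg'
    rw [hmap]
    have hrec := ih (l.filter (fun x => !(key x == g))) hnd'.2 (by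
      intro x hx
      rw [List.mem_filter] at hx
      have := hcov x hx.1
      simp only [List.mem_cons] at this
      rcases this with h1 | h2
      · exfalso; simp [h1] at hx
      · exact h2)
    exact (hrec.append_left _).trans (List.filter_append_perm _ l)

-- the buckets dict: lookup of group g is the list of positions of g's ids
lemma bucketsGetD (case_ids : List String) (g : String) :
    ((PySem.List.enumerate case_ids 0).foldl
      (fun d p => d.modify (inferGroup p.2) [] (· ++ [p.1])) PySem.Dict.empty).getD g []
    = ((PySem.List.enumerate case_ids 0).filter (fun p => inferGroup p.2 == g)).map (·.1) := by
  have h := List.foldl_map (f := fun p : Int × String => (inferGroup p.2, p.1))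
    (g := fun (d : PySem.Dict String (List Int)) q => d.modify q.1 [] (· ++ [q.2]))
    (l := PySem.List.enumerate case_ids 0) (init := PySem.Dict.empty)
  rw [← h, PySem.Dict.getD_foldl_modify_append, PySem.Dict.getD_empty, List.filter_map,
    List.map_map]
  simp [Function.comp_def]

lemma bucketsKeys (case_ids : List String) :
    ((PySem.List.enumerate case_ids 0).foldl
      (fun d p => d.modify (inferGroup p.2) [] (· ++ [p.1])) PySem.Dict.empty).keys
    = PySem.Set.ofList (case_ids.map inferGroup) := by
  rw [PySem.Dict.keys_foldl_modify_key (PySem.List.enumerate case_ids 0)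
    (fun p => inferGroup p.2) [] (fun d p => (· ++ [p.1])) PySem.Dict.empty]
  have : (PySem.List.enumerate case_ids 0).map (fun p => inferGroup p.2)
      = case_ids.map inferGroup := by
    rw [show (fun p : Int × String => inferGroup p.2) = inferGroup ∘ (fun p => p.2) from rfl,
      ← List.map_map, PySem.List.map_snd_enumerate]
  rw [this, PySem.Dict.keys_empty]
  rfl

-- ===== VERDICT (by name: the statement is the Claim_ definition above) =====
theorem limit_case_ids_per_source_spec : Claim_equal_limit_case_ids_per_source := by
  intro case_ids psl _
  unfold Spec_limit_case_ids_per_source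
  cases psl with
  | none => rfl
  | some L =>
    by_cases hL : L ≤ 0
    · unfold limit_case_ids_per_source limit_case_ids_per_source_alt
      simp [hL]
    · have hLpos : 0 < L := by omega
      have h0L : (0 : Int) ≤ L := le_of_lt hLpos
      -- every element of the enumeration is (k, case_ids[k])
      have hmemE : ∀ p ∈ PySem.List.enumerate case_ids 0,
          ∃ (k : Nat) (h : k < case_ids.length), p = ((k : Int), case_ids[k]) := by
        intro p hp
        rw [PySem.List.mem_enumerate_iff] at hp
        obtain ⟨k, hk, hpk⟩ := hp
        exact ⟨k, hk, by simpa using hpk⟩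
      -- A's output is the keepP-filter of the enumeration
      have hA : limit_case_ids_per_source case_ids (some L)
          = ((PySem.List.enumerate case_ids 0).filter
              (keepP L (case_ids.map inferGroup))).map (·.2) := by
        simp only [limit_case_ids_per_source]
        rw [if_neg hL, aSide L case_ids PySem.Dict.empty [] []
          (by intro g; rw [PySem.Dict.getD_empty]; simp; omega)]
        have hk := keepFilter L (case_ids.map inferGroup) case_ids [] (by simp)
        simp only [List.length_nil, Nat.cast_zero, List.nil_append] at hk ⊢
        exact hk.symm
      rw [hA]
      -- B's output
      simp only [limit_case_ids_per_source_alt]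
      rw [if_neg hL]
      have hnodupK : ((PySem.List.enumerate case_ids 0).foldl
          (fun d p => d.modify (inferGroup p.2) [] (· ++ [p.1])) PySem.Dict.empty).keys.Nodup :=
        PySem.Dict.nodup_keys_foldl_modify_key _ _ _ _ _ (by simp)
      rw [PySem.Dict.values_eq_map_keys _ hnodupK [], bucketsKeys, List.flatMap_map]
      -- the kept positions, group by group, are the keepP-filtered positions of that group
      have hbucket : ∀ g, PySem.List.slice
          (((PySem.List.enumerate case_ids 0).foldl
            (fun d p => d.modify (inferGroup p.2) [] (· ++ [p.1]))
            PySem.Dict.empty).getD g []) none (some L)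
          = (((PySem.List.enumerate case_ids 0).filter
              (keepP L (case_ids.map inferGroup))).filter
                (fun p => inferGroup p.2 == g)).map (·.1) := by
        intro g
        rw [bucketsGetD, PySem.List.slice_to _ h0L]
        have hbt := bucketTake L (case_ids.map inferGroup) g case_ids [] (by simp)
        simp only [List.length_nil, Nat.cast_zero, List.count_nil, Nat.sub_zero] at hbt
        rw [← hbt, List.filter_filter]
      rw [List.flatMap_congr (fun g _ => hbucket g)]
      -- a permutation of the keepP-filtered positions, strictly increasing, hence sorted = itself
      have hperm : ((PySem.Set.ofList (case_ids.map inferGroup)).flatMap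
          (fun g => ((PySem.List.enumerate case_ids 0).filter
            (keepP L (case_ids.map inferGroup))).filter
              (fun p => inferGroup p.2 == g))).Perm
          ((PySem.List.enumerate case_ids 0).filter (keepP L (case_ids.map inferGroup))) := by
        refine permFlatMapFilter (fun p : Int × String => inferGroup p.2) _ _
          (PySem.Set.nodup_ofList (case_ids.map inferGroup)) ?_
        intro p hp
        rw [PySem.Set.mem_ofList]
        obtain ⟨k, hk, hpk⟩ := hmemE p (List.mem_of_mem_filter hp)
        subst hpk
        exact List.mem_map_of_mem (by simp)
      have hpair : (((PySem.List.enumerate case_ids 0).filter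
          (keepP L (case_ids.map inferGroup))).map (·.1)).Pairwise (· < ·) := by
        rw [List.pairwise_map]
        exact (PySem.List.pairwise_lt_enumerate case_ids 0).filter _
      rw [← List.map_flatMap,
        PySem.List.sorted_eq_of_perm_of_pairwise_lt _ _ _ (hperm.map (·.1)).symm hpair,
        List.map_map]
      apply (List.map_congr_left ?_).symm
      intro p hp
      obtain ⟨k, hk, hpk⟩ := hmemE p (List.mem_of_mem_filter hp)
      subst hpk
      simp [PySem.List.pyGetD_natCast, List.getD_eq_getElem?_getD, List.getElem?_eq_getElem hk]
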